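-- pv_equiv track=rewrite | github.com/JulianBurns85/rayhunter-threat-analyzer | detectors/base.py | filter_by_type
-- ===== SOURCE A (Python) =====
-- from typing import List, Dict, Any
--
-- def filter_by_type(events: List[Dict], msg_types: List[str]) -> List[Dict]:
--     """Filter events to those matching any of the given message type strings."""
--     msg_types_lower = [m.lower() for m in msg_types]
--     return [
--         e for e in events
--         if any(
--             m in str(e.get("msg_type", "")).lower()
--             for m in msg_types_lower
--         )
--     ]
-- ===== SOURCE B (Python) =====
-- def filter_by_type(events, msg_types):
--     """Filter events to those matching any of the given message type strings."""
--     matched = set()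
--     for m in msg_types:
--         ml = m.lower()
--         for i, e in enumerate(events):
--             if i not in matched and ml in str(e.get("msg_type", "")).lower():
--                 matched.add(i)
--     return [e for i, e in enumerate(events) if i in matched]
-- ===== Notes on version B (the rewrite author's own statement) =====
-- stated objective: alternative
-- what changed: Transposed loop order: B iterates patterns in the outer loop, collecting the set of matched event indices (each event's text tested at most once per pattern and skipped once matched), then emits kept events in original order, instead of A's per-event any-over-patterns scan.
import Mathlib
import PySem

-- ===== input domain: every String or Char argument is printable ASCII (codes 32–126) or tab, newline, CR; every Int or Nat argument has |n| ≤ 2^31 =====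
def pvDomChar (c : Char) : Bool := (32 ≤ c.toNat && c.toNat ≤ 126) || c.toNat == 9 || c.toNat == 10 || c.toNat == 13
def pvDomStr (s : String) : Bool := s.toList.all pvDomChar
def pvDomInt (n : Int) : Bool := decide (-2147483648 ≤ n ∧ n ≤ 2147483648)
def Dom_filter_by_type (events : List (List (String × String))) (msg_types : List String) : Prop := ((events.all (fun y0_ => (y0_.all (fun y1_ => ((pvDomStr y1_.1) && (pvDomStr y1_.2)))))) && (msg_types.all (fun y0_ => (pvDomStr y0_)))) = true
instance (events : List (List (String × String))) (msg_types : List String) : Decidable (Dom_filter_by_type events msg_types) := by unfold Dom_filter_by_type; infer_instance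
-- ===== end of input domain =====

-- B transposes the loops: pattern-major traversal collecting the set of matched event indices, then emits kept events in order (alternative structure, same result).

-- ===== PORT A =====
def filter_by_type (events : List (List (String × String))) (msg_types : List String) : List (List (String × String)) :=
  let msg_types_lower := msg_types.map PySem.Str.lower
  events.filter (fun e =>
    msg_types_lower.any (fun m =>
      PySem.Str.isIn m (PySem.Str.lower (PySem.Dict.getD (PySem.Dict.mk e) "msg_type" ""))))

-- ===== PORT B =====
def filter_by_type_alt (events : List (List (String × String))) (msg_types : List String) : List (List (String × String)) :=
  let matched := msg_types.foldl (fun acc m =>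
    let ml := PySem.Str.lower m
    (PySem.List.enumerate events).foldl (fun acc2 ie =>
      if !(PySem.Set.contains acc2 ie.1) &&
         PySem.Str.isIn ml (PySem.Str.lower (PySem.Dict.getD (PySem.Dict.mk ie.2) "msg_type" "")) then
        PySem.Set.add acc2 ie.1
      else acc2) acc) PySem.Set.empty
  ((PySem.List.enumerate events).filter (fun ie => PySem.Set.contains matched ie.1)).map (·.2)

-- ===== PRECONDITION & SPEC =====
def Spec_filter_by_type (events : List (List (String × String))) (msg_types : List String) (out : List (List (String × String))) : Prop := out = filter_by_type_alt events msg_types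
instance (events : List (List (String × String))) (msg_types : List String) (out : List (List (String × String))) : Decidable (Spec_filter_by_type events msg_types out) := by unfold Spec_filter_by_type; infer_instance

-- ===== CLAIM (what is proved, stated in full; the proofs are below) =====
def Claim_equal_filter_by_type : Prop := ∀ (events : List (List (String × String))) (msg_types : List String), Dom_filter_by_type events msg_types → Spec_filter_by_type events msg_types (filter_by_type events msg_types)

-- ===== LEMMAS AND PROOFS =====

-- pattern m hits event e
def pvHit (m : String) (e : List (String × String)) : Bool :=
  PySem.Str.isIn (PySem.Str.lower m) (PySem.Str.lower (PySem.Dict.getD (PySem.Dict.mk e) "msg_type" ""))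

theorem pv_contains_add (s : PySem.Set Int) (y i : Int) :
    PySem.Set.contains (PySem.Set.add s y) i = (PySem.Set.contains s i || y == i) := by
  simp [PySem.Set.add, PySem.Set.contains]
  split_ifs with h
  · simp_all
    intro h'; subst h'; exact h
  · by_cases hy : y = i <;> simp [hy, Ne.symm]

-- one inner pass (over any list of (index, event) pairs) marks exactly the events the pattern hits
theorem pv_inner (c : List (String × String) → Bool) :
    ∀ (l : List (Int × List (String × String))) (acc : PySem.Set Int) (i : Int),
      PySem.Set.contains (l.foldl (fun acc2 ie =>
        if !(PySem.Set.contains acc2 ie.1) && c ie.2 then PySem.Set.add acc2 ie.1 else acc2) acc) i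
      = (PySem.Set.contains acc i || l.any (fun ie => ie.1 == i && c ie.2)) := by
  intro l
  induction l with
  | nil => intro acc i; simp
  | cons x xs ih =>
    intro acc i
    rw [List.foldl_cons, List.any_cons]
    by_cases h : (!(PySem.Set.contains acc x.1) && c x.2) = true
    · rw [if_pos h, ih, pv_contains_add]
      have hc : c x.2 = true := (Bool.and_eq_true _ _ |>.mp h).2
      rw [hc]
      cases PySem.Set.contains acc i <;> cases (x.1 == i) <;>
        cases xs.any (fun ie => ie.1 == i && c ie.2) <;> simp
    · rw [if_neg h, ih]
      by_cases hc : c x.2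
      · have hm : PySem.Set.contains acc x.1 = true := by
          cases hcm : PySem.Set.contains acc x.1
          · exfalso; exact h (by rw [hcm, hc]; rfl)
          · rfl
        by_cases hx : x.1 = i
        · subst hx; rw [hm]; simp
        · have hxi : (x.1 == i) = false := by simp [hx]
          rw [hxi]; simp
      · have hcf : c x.2 = false := by simpa using hc
        rw [hcf]; simp

-- the outer fold over all patterns
theorem pv_outer (l : List (Int × List (String × String))) :
    ∀ (ms : List String) (acc : PySem.Set Int) (i : Int),
      PySem.Set.contains (ms.foldl (fun acc m =>
        l.foldl (fun acc2 ie =>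
          if !(PySem.Set.contains acc2 ie.1) && pvHit m ie.2 then PySem.Set.add acc2 ie.1 else acc2) acc) acc) i
      = (PySem.Set.contains acc i || ms.any (fun m => l.any (fun ie => ie.1 == i && pvHit m ie.2))) := by
  intro ms
  induction ms with
  | nil => intro acc i; simp
  | cons m ms ih =>
    intro acc i
    rw [List.foldl_cons, List.any_cons, ih, pv_inner (pvHit m)]
    cases PySem.Set.contains acc i <;> simp

-- an index-keyed any-test over an enumerate whose indices all exceed i is false
theorem pv_any_enumerate_lt (g : List (String × String) → Bool) :
    ∀ (xs : List (List (String × String))) (s : Int) (i : Int), i < s →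
      (PySem.List.enumerate xs s).any (fun je => je.1 == i && g je.2) = false := by
  intro xs
  induction xs with
  | nil => intro s i _; simp [PySem.List.enumerate_nil]
  | cons x xs ih =>
    intro s i h
    rw [PySem.List.enumerate_cons, List.any_cons, ih (s+1) i (by omega)]
    have : (s == i) = false := by simp; omega
    rw [this]; simp

-- an any-test over enumerate keyed on one of its indices reduces to the test at that event
theorem pv_any_enumerate (g : List (String × String) → Bool) :
    ∀ (xs : List (List (String × String))) (s : Int) (ie : Int × List (String × String)),
      ie ∈ PySem.List.enumerate xs s →
      (PySem.List.enumerate xs s).any (fun je => je.1 == ie.1 && g je.2) = g ie.2 := by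
  intro xs
  induction xs with
  | nil => intro s ie h; simp [PySem.List.enumerate_nil] at h
  | cons x xs ih =>
    intro s ie h
    rw [PySem.List.enumerate_cons] at h ⊢
    rw [List.any_cons]
    rcases List.mem_cons.mp h with h1 | h2
    · subst h1
      rw [pv_any_enumerate_lt g xs (s+1) s (by omega)]
      simp
    · have hgt : s < ie.1 := by
        rcases (PySem.List.mem_enumerate_iff _ _ _).mp h2 with ⟨k, hk, hp⟩
        rw [hp]; omega
      have : (s == ie.1) = false := by simp; omega
      rw [this, ih (s+1) ie h2]; simp

-- filtering enumerate by an index test that agrees with a value test, then dropping the indices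
theorem pv_filter_map (f : Int → Bool) (P : List (String × String) → Bool) :
    ∀ (xs : List (List (String × String))) (s : Int),
      (∀ ie ∈ PySem.List.enumerate xs s, f ie.1 = P ie.2) →
      ((PySem.List.enumerate xs s).filter (fun ie => f ie.1)).map (·.2) = xs.filter P := by
  intro xs
  induction xs with
  | nil => intro s h; simp [PySem.List.enumerate_nil]
  | cons x xs ih =>
    intro s h
    rw [PySem.List.enumerate_cons] at h ⊢
    rw [List.filter_cons]
    have hx : f s = P x := h (s, x) (List.mem_cons_self ..)
    have ht := ih (s+1) (fun ie hie => h ie (List.mem_cons_of_mem _ hie))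
    by_cases hp : P x
    · rw [List.filter_cons_of_pos (by simp [hp])]
      simp only [hx, hp]
      simp [ht]
    · have hpf : P x = false := by simpa using hp
      rw [List.filter_cons_of_neg (by simp [hpf])]
      simp only [hx, hpf]
      simp [ht]

theorem pv_any_all (msg_types : List String) (events : List (List (String × String)))
    (ie : Int × List (String × String)) (hie : ie ∈ PySem.List.enumerate events 0) :
    msg_types.any (fun m => (PySem.List.enumerate events 0).any (fun je => je.1 == ie.1 && pvHit m je.2))
      = msg_types.any (fun m => pvHit m ie.2) := by
  induction msg_types with
  | nil => rfl
  | cons m ms ihm =>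
    rw [List.any_cons, List.any_cons, ihm, pv_any_enumerate (pvHit m) events 0 ie hie]

theorem pv_A_eq (events : List (List (String × String))) (msg_types : List String) :
    filter_by_type events msg_types = events.filter (fun e => msg_types.any (fun m => pvHit m e)) := by
  unfold filter_by_type pvHit
  simp [List.any_map, Function.comp_def]

theorem pv_B_eq (events : List (List (String × String))) (msg_types : List String) :
    filter_by_type_alt events msg_types = events.filter (fun e => msg_types.any (fun m => pvHit m e)) := by
  unfold filter_by_type_alt
  apply pv_filter_map
  intro ie hie
  have hempty : PySem.Set.contains PySem.Set.empty ie.1 = false := by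
    simp [PySem.Set.empty, PySem.Set.contains]
  have h := pv_outer (PySem.List.enumerate events 0) msg_types PySem.Set.empty ie.1
  rw [hempty, Bool.false_or] at h
  exact h.trans (pv_any_all msg_types events ie hie)

-- ===== VERDICT (by name: the statement is the Claim_ definition above) =====
theorem filter_by_type_spec : Claim_equal_filter_by_type := by
  intro events msg_types _
  unfold Spec_filter_by_type
  rw [pv_A_eq, pv_B_eq]
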